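-- pv_equiv track=rewrite | github.com/bbbeton/AOC | aoc2023/day2/aoc3-4.py | game_number
-- ===== SOURCE A (Python) =====
-- def game_number(line):
--     num = []
--     liczba = 0
--     for element in line:
--         if ord(element)>47 and ord(element)<58:
--             num.append(int(element))
--         elif element == ':':
--             for i in range(len(num)):
--                 liczba += (10**i)*num[-1 - i]
--             break
--     return liczba
-- ===== SOURCE B (Python) =====
-- def game_number(line):
--     if ':' not in line:
--         return 0
--     n = 0
--     for c in line.split(':', 1)[0]:
--         if '0' <= c <= '9':
--             n = n * 10 + ord(c) - 48
--     return n
-- ===== Notes on version B (the rewrite author's own statement) =====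
-- stated objective: simpler
-- what changed: B replaces A's digit-list accumulator plus second positional-weight loop (sum of 10**i * num[-1-i]) with an early colon check, a split before the first colon, and a single Horner-style accumulation n = n*10 + digit, never materialising the digit list.
import Mathlib
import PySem

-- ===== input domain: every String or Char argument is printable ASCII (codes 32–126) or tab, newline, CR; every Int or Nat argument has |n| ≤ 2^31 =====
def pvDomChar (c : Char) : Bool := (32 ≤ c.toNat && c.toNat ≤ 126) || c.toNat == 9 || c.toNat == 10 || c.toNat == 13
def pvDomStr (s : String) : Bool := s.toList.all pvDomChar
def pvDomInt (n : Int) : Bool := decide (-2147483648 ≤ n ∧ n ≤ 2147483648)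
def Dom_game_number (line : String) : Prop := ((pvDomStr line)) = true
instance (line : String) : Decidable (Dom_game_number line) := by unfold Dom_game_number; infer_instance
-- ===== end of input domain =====

-- B drops A's digit-list + positional-weight reconstruction for a split-then-Horner single pass (objective: simpler).

-- ===== PORT A =====
-- loop over the characters with the digit-list accumulator `num`; at the first ':' the
-- inner `for i in range(len(num)): liczba += (10**i)*num[-1-i]` loop runs and the loop breaks.
def gnLoopA : List Char → List Int → Int
  | [], _ => 0
  | c :: rest, num =>
    if 47 < c.toNat ∧ c.toNat < 58 then
      gnLoopA rest (num ++ [((c.toNat : Int) - 48)])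
    else if c = ':' then
      (PySem.List.pyRange 0 (num.length : Int) 1).foldl
        (fun acc i => acc + 10 ^ i.toNat * PySem.List.pyGetD num (-1 - i) 0) 0
    else gnLoopA rest num

def game_number (line : String) : Int := gnLoopA line.toList []

-- ===== PORT B =====
-- `':' not in line` on a 1-char needle is char membership; `line.split(':',1)[0]` is the
-- chars before the first ':' (exact here since a ':' is present), i.e. takeWhile (· ≠ ':').
def game_number_alt (line : String) : Int :=
  if ':' ∈ line.toList then
    (line.toList.takeWhile (fun c => c ≠ ':')).foldl
      (fun n c => if '0' ≤ c ∧ c ≤ '9' then n * 10 + ((c.toNat : Int) - 48) else n) 0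
  else 0

-- ===== PRECONDITION & SPEC =====
def Spec_game_number (line : String) (out : Int) : Prop := out = game_number_alt line
instance (line : String) (out : Int) : Decidable (Spec_game_number line out) := by unfold Spec_game_number; infer_instance

-- ===== CLAIM (what is proved, stated in full; the proofs are below) =====
def Claim_equal_game_number : Prop := ∀ (line : String), Dom_game_number line → Spec_game_number line (game_number line)

-- ===== LEMMAS AND PROOFS =====

-- Horner value of a digit list from accumulator a
def pvVal (a : Int) (num : List Int) : Int := num.foldl (fun n d => n * 10 + d) a

lemma pvVal_append_singleton (a d : Int) (num : List Int) :
    pvVal a (num ++ [d]) = pvVal a num * 10 + d := by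
  simp [pvVal]

lemma pvVal_acc (a : Int) (num : List Int) :
    pvVal a num = a * 10 ^ num.length + pvVal 0 num := by
  induction num generalizing a with
  | nil => simp [pvVal]
  | cons d t ih =>
      simp only [pvVal, List.foldl_cons, List.length_cons]
      rw [show (t.foldl (fun n d => n * 10 + d) (a * 10 + d)) = pvVal (a * 10 + d) t from rfl,
          show (t.foldl (fun n d => n * 10 + d) (0 * 10 + d)) = pvVal (0 * 10 + d) t from rfl,
          ih (a * 10 + d), ih (0 * 10 + d)]
      ring

lemma pyGetD_cons_of_lt (d : Int) (num : List Int) (i : Int)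
    (h0 : 0 ≤ i) (h1 : i < (num.length : Int)) :
    PySem.List.pyGetD (d :: num) (-1 - i) 0 = PySem.List.pyGetD num (-1 - i) 0 := by
  simp only [PySem.List.pyGetD, PySem.List.pyGet?, PySem.List.pyIdx?, List.length_cons]
  have hi : ¬ (0 : Int) ≤ -1 - i := by omega
  have h2 : -((num.length : Int) + 1) ≤ -1 - i := by omega
  have h3 : -((num.length : Int)) ≤ -1 - i := by omega
  simp only [hi, if_neg, Nat.cast_add, Nat.cast_one, h2, h3, if_pos, Option.bind_some]
  have hk : (1 + i).toNat ≤ num.length := by omega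
  have hkey : num.length + 1 - (-(-1 - i)).toNat = (num.length - (-(-1 - i)).toNat) + 1 := by
    omega
  rw [hkey]
  simp

lemma pyGetD_cons_last (d : Int) (num : List Int) :
    PySem.List.pyGetD (d :: num) (-1 - (num.length : Int)) 0 = d := by
  simp only [PySem.List.pyGetD, PySem.List.pyGet?, PySem.List.pyIdx?, List.length_cons]
  have hi : ¬ (0 : Int) ≤ -1 - (num.length : Int) := by omega
  have h2 : -(((num.length : Int)) + 1) ≤ -1 - (num.length : Int) := by omega
  simp only [hi, if_neg, Nat.cast_add, Nat.cast_one, h2, if_pos, Option.bind_some]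
  have : num.length + 1 - (-(-1 - (num.length : Int))).toNat = 0 := by omega
  rw [this]
  simp

-- A's inner positional-weight loop computes the Horner value of num
lemma sumA_eq_pvVal : ∀ num : List Int,
    (PySem.List.pyRange 0 (num.length : Int) 1).foldl
      (fun acc i => acc + 10 ^ i.toNat * PySem.List.pyGetD num (-1 - i) 0) 0 = pvVal 0 num := by
  intro num
  induction num with
  | nil => simp [PySem.List.pyRange_one_eq_nil, pvVal]
  | cons d t ih =>
      have hsplit : PySem.List.pyRange 0 ((d :: t).length : Int) 1
          = PySem.List.pyRange 0 (t.length : Int) 1 ++ [(t.length : Int)] := by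
        have := PySem.List.pyRange_one_succ_right (show (0:Int) ≤ (t.length : Int) by omega)
        simpa [List.length_cons] using this
      rw [hsplit, List.foldl_append]
      have hcongr : (PySem.List.pyRange 0 (t.length : Int) 1).foldl
            (fun acc i => acc + 10 ^ i.toNat * PySem.List.pyGetD (d :: t) (-1 - i) 0) 0
          = (PySem.List.pyRange 0 (t.length : Int) 1).foldl
            (fun acc i => acc + 10 ^ i.toNat * PySem.List.pyGetD t (-1 - i) 0) 0 := by
        apply PySem.List.foldl_congr_mem
        intro acc x hx
        rcases (PySem.List.mem_pyRange_one).1 hx with ⟨hx0, hx1⟩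
        rw [pyGetD_cons_of_lt d t x hx0 hx1]
      rw [hcongr, ih]
      simp only [List.foldl_cons, List.foldl_nil, pyGetD_cons_last]
      have : pvVal 0 (d :: t) = pvVal d t := by simp [pvVal]
      rw [this, pvVal_acc d t]
      have hT : ((t.length : Int)).toNat = t.length := by omega
      rw [hT]
      ring

lemma digit_iff (c : Char) : ('0' ≤ c ∧ c ≤ '9') ↔ (47 < c.toNat ∧ c.toNat < 58) := by
  have h1 : ('0' ≤ c) ↔ 48 ≤ c.toNat := by rw [Char.le_def, UInt32.le_iff_toNat_le]; rfl
  have h2 : (c ≤ '9') ↔ c.toNat ≤ 57 := by rw [Char.le_def, UInt32.le_iff_toNat_le]; rfl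
  rw [h1, h2]; omega


lemma gnLoopA_no_colon : ∀ (cs : List Char) (num : List Int), ':' ∉ cs → gnLoopA cs num = 0 := by
  intro cs
  induction cs with
  | nil => intro num _; rfl
  | cons c rest ih =>
      intro num h
      have hc : c ≠ ':' := fun hh => h (hh ▸ List.mem_cons_self)
      have hr : ':' ∉ rest := fun hh => h (List.mem_cons_of_mem _ hh)
      by_cases hd : 47 < c.toNat ∧ c.toNat < 58
      · simp [gnLoopA, hd, ih _ hr]
      · simp [gnLoopA, hd, hc, ih _ hr]

lemma gnLoopA_colon : ∀ (cs : List Char) (num : List Int), ':' ∈ cs →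
    gnLoopA cs num = (cs.takeWhile (fun c => c ≠ ':')).foldl
      (fun n c => if '0' ≤ c ∧ c ≤ '9' then n * 10 + ((c.toNat : Int) - 48) else n)
      (pvVal 0 num) := by
  intro cs
  induction cs with
  | nil => intro num h; cases h
  | cons c rest ih =>
      intro num h
      by_cases hcol : c = ':'
      · subst hcol
        have hd : ¬ (47 < (':').toNat ∧ (':').toNat < 58) := by decide
        simp only [gnLoopA, hd, if_neg, if_pos rfl, not_false_eq_true]
        rw [sumA_eq_pvVal num]
        simp
      · have hr : ':' ∈ rest := by
          cases h with
          | head => exact absurd rfl hcol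
          | tail _ hh => exact hh
        by_cases hd : 47 < c.toNat ∧ c.toNat < 58
        · have hb : ('0' ≤ c ∧ c ≤ '9') := (digit_iff c).mpr hd
          simp only [gnLoopA, hd, if_pos]
          rw [ih _ hr]
          have htw : (c :: rest).takeWhile (fun c => c ≠ ':')
              = c :: rest.takeWhile (fun c => c ≠ ':') := by
            simp [List.takeWhile_cons, hcol]
          rw [htw, List.foldl_cons, if_pos hb, pvVal_append_singleton]
          simp
        · have hb : ¬ ('0' ≤ c ∧ c ≤ '9') := fun hh => hd ((digit_iff c).mp hh)
          simp only [gnLoopA, hd, if_neg, hcol, not_false_eq_true]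
          rw [ih _ hr]
          have htw : (c :: rest).takeWhile (fun c => c ≠ ':')
              = c :: rest.takeWhile (fun c => c ≠ ':') := by
            simp [List.takeWhile_cons, hcol]
          rw [htw, List.foldl_cons, if_neg hb]

-- ===== VERDICT (by name: the statement is the Claim_ definition above) =====
theorem game_number_spec : Claim_equal_game_number := by
  intro line _
  unfold Spec_game_number game_number game_number_alt
  by_cases h : ':' ∈ line.toList
  · rw [if_pos h, gnLoopA_colon line.toList [] h]
    simp [pvVal]
  · rw [if_neg h, gnLoopA_no_colon line.toList [] h]
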